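-- pv_equiv track=rewrite | github.com/nquist/ProjectEulerSolutions | Projects 051-060/euler054.py | card_hand_sum
-- ===== SOURCE A (Python) =====
-- dic = {'2':'02','3':'03','4':'04','5':'05','6':'06',
--        '7':'07','8':'08','9':'09','T':'10','J':'11',
--        'Q':'12','K':'13', 'A':'14'}
--
-- def card_hand_sum(hand):
--     nums = [dic[hand[x]] for x in range(0, len(hand), 3)]
--     nums_set_list = list(set(nums))
--     count_list = []
--     num_string = ''
--     for i in nums_set_list:
--         count = nums.count(i)
--         count_list.append([count, i])
--     while len(count_list) > 0:
--         curr_val = max(count_list)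
--         idx = count_list.index(curr_val)
--         num_string += curr_val[1]*curr_val[0]
--         count_list.pop(idx)
--     return num_string
-- ===== SOURCE B (Python) =====
-- dic = {'2':'02','3':'03','4':'04','5':'05','6':'06',
--        '7':'07','8':'08','9':'09','T':'10','J':'11',
--        'Q':'12','K':'13', 'A':'14'}
--
-- def card_hand_sum(hand):
--     nums = [dic[hand[x]] for x in range(0, len(hand), 3)]
--     counts = {}
--     for v in nums:
--         counts[v] = counts.get(v, 0) + 1
--     groups = sorted(counts.items(), key=lambda kv: (kv[1], kv[0]), reverse=True)
--     return ''.join(v * c for v, c in groups)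
-- ===== Notes on version B (the rewrite author's own statement) =====
-- stated objective: idiomatic
-- what changed: A selects output groups by repeatedly taking max of the [count,value] list, finding its index and popping it (a selection sort); B counts occurrences into a dict in one pass and does a single descending sort of the grouped (value,count) items by key (count,value), then joins value*count per group.
import Mathlib
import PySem

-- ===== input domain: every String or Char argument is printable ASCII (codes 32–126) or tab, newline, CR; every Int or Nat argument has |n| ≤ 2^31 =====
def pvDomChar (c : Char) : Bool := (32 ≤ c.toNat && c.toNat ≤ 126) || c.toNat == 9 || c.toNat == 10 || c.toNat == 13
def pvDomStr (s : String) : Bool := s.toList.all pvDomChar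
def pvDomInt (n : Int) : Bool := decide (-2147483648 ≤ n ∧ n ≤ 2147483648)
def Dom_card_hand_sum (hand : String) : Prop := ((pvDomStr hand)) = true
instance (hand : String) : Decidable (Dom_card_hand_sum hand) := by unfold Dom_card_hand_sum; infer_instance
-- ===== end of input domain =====

-- B replaces A's quadratic repeated max/index/pop selection loop over the count list by one
-- counting dict plus a single descending sort of the grouped (value, count) items (objective:
-- alternative / more idiomatic; not measured faster). A's result does not depend on CPython's
-- set iteration order (the selection loop emits pairs in a canonical order), so porting
-- list(set(nums)) as first-occurrence order is exact for the returned value.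

-- ===== PORT A =====
def dicA : PySem.Dict Char String := PySem.Dict.ofList
  [('2',"02"),('3',"03"),('4',"04"),('5',"05"),('6',"06"),
   ('7',"07"),('8',"08"),('9',"09"),('T',"10"),('J',"11"),
   ('Q',"12"),('K',"13"),('A',"14")]

-- nums = [dic[hand[x]] for x in range(0, len(hand), 3)]; under Pre_ every lookup hits, the
-- getD defaults are never used.
def numsA (hand : String) : List String :=
  (PySem.List.pyRange 0 (PySem.Str.len hand) 3).map
    (fun x => (PySem.Dict.get? dicA ((PySem.Str.pyGet? hand x).getD ' ')).getD "")

-- the 'while len(count_list) > 0' loop: curr_val = max(count_list) (lexicographic on the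
-- [count, value] pairs), idx = index, num_string += value*count, pop(idx).  num_string is
-- accumulated as List Char (Lean's String.append is opaque to the kernel) and packed by
-- String.mk at the end.
def selLoopA (cl : List (Int × String)) (acc : List Char) : List Char :=
  if 0 < cl.length then
    match PySem.List.max2? cl (fun p => p.1) (fun p => p.2) with
    | none => acc
    | some cv =>
      match PySem.List.index? cl cv with
      | none => acc
      | some idx =>
        match hp : PySem.List.pop? cl (idx : Int) with
        | none => acc
        | some vr => selLoopA vr.2 (acc ++ PySem.List.pyRepeat cv.2.toList cv.1)
  else acc
termination_by cl.length
decreasing_by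
  have := PySem.List.length_of_pop?_eq_some cl hp
  omega

def card_hand_sum (hand : String) : String :=
  let nums := numsA hand
  let nums_set_list := PySem.Set.ofList nums
  let count_list := nums_set_list.foldl
    (fun acc i => acc ++ [(((nums.count i : Nat) : Int), i)]) []
  String.mk (selLoopA count_list [])

-- ===== PORT B =====
def dicB : PySem.Dict Char String := PySem.Dict.ofList
  [('2',"02"),('3',"03"),('4',"04"),('5',"05"),('6',"06"),
   ('7',"07"),('8',"08"),('9',"09"),('T',"10"),('J',"11"),
   ('Q',"12"),('K',"13"),('A',"14")]

def numsB (hand : String) : List String :=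
  (PySem.List.pyRange 0 (PySem.Str.len hand) 3).map
    (fun x => (PySem.Dict.get? dicB ((PySem.Str.pyGet? hand x).getD ' ')).getD "")

-- counts[v] = counts.get(v, 0) + 1; groups = sorted(counts.items(), key=(count, value),
-- reverse=True); ''.join(v * c) ported via Chars.join with empty separator.
def card_hand_sum_alt (hand : String) : String :=
  let nums := numsB hand
  let counts := nums.foldl (fun d v => d.insert v (d.getD v 0 + 1)) PySem.Dict.empty
  let groups := PySem.List.sorted2 counts.items (fun kv => kv.2) (fun kv => kv.1) true
  String.mk (PySem.Chars.join []
    (groups.map (fun kv => PySem.List.pyRepeat kv.1.toList kv.2)))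

-- ===== PRECONDITION & SPEC =====
-- Python A raises KeyError when a character sampled at indices 0, 3, 6, … is not a card
-- value; Pre_ admits exactly the hands where every such character is one.
def Pre_card_hand_sum (hand : String) : Prop :=
  ∀ x ∈ PySem.List.pyRange 0 (PySem.Str.len hand) 3,
    ((PySem.Str.pyGet? hand x).getD ' ')
      ∈ (['2','3','4','5','6','7','8','9','T','J','Q','K','A'] : List Char)
instance (hand : String) : Decidable (Pre_card_hand_sum hand) := by
  unfold Pre_card_hand_sum; infer_instance

def pvWitness_card_hand_sum : String := "5H 5C 6S 7S KD"

def Spec_card_hand_sum (hand : String) (out : String) : Prop := out = card_hand_sum_alt hand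
instance (hand : String) (out : String) : Decidable (Spec_card_hand_sum hand out) := by unfold Spec_card_hand_sum; infer_instance

-- ===== CLAIM (what is proved, stated in full; the proofs are below) =====
def Claim_equal_card_hand_sum : Prop := ∀ (hand : String), Dom_card_hand_sum hand → Pre_card_hand_sum hand → Spec_card_hand_sum hand (card_hand_sum hand)

-- ===== LEMMAS AND PROOFS =====

-- Both ports sort (explicitly or through the selection loop) by the lexicographic key
-- (count, value); keyCV reads it off A's (count, value) pairs, keyVC off B's (value, count)
-- items.
def keyCV (p : Int × String) : Lex (Int × String) := toLex (p.1, p.2)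
def keyVC (q : String × Int) : Lex (Int × String) := toLex (q.2, q.1)

theorem keyCV_injective : Function.Injective keyCV := by
  intro p q h
  have h' : (p.1, p.2) = (q.1, q.2) := toLex.injective h
  exact Prod.ext (congrArg Prod.fst h') (congrArg Prod.snd h')

theorem keyVC_injective : Function.Injective keyVC := by
  intro p q h
  have h' : (p.2, p.1) = (q.2, q.1) := toLex.injective h
  exact Prod.ext (congrArg Prod.snd h') (congrArg Prod.fst h')

theorem keyVC_swap (p : Int × String) : keyVC (p.2, p.1) = keyCV p := rfl

-- the Boolean comparison sorted2/max2? use, as a single lexicographic key comparison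
theorem ltb_eq_decide_keyCV (a b : Int × String) :
    (decide (a.1 < b.1) || (!decide (b.1 < a.1) && decide (a.2 < b.2)))
      = decide (keyCV a < keyCV b) := by
  have h : keyCV a < keyCV b ↔ (a.1 < b.1 ∨ (¬ (b.1 < a.1) ∧ a.2 < b.2)) := by
    rw [keyCV, keyCV, Prod.Lex.lt_iff]
    simp only [ofLex_toLex]
    constructor
    · rintro (h | ⟨h1, h2⟩)
      · exact Or.inl h
      · exact Or.inr ⟨by omega, h2⟩
    · rintro (h | ⟨h1, h2⟩)
      · exact Or.inl h
      · rcases lt_or_ge a.1 b.1 with h3 | h3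
        · exact Or.inl h3
        · exact Or.inr ⟨by omega, h2⟩
  rw [decide_eq_decide.mpr h]
  by_cases h1 : a.1 < b.1 <;> by_cases h2 : b.1 < a.1 <;> by_cases h3 : a.2 < b.2 <;>
    simp [h1, h2, h3]
  infer_instance

theorem ltb_eq_decide_keyVC (a b : String × Int) :
    (decide (a.2 < b.2) || (!decide (b.2 < a.2) && decide (a.1 < b.1)))
      = decide (keyVC a < keyVC b) := by
  have h : keyVC a < keyVC b ↔ (a.2 < b.2 ∨ (¬ (b.2 < a.2) ∧ a.1 < b.1)) := by
    rw [keyVC, keyVC, Prod.Lex.lt_iff]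
    simp only [ofLex_toLex]
    constructor
    · rintro (h | ⟨h1, h2⟩)
      · exact Or.inl h
      · exact Or.inr ⟨by omega, h2⟩
    · rintro (h | ⟨h1, h2⟩)
      · exact Or.inl h
      · rcases lt_or_ge a.2 b.2 with h3 | h3
        · exact Or.inl h3
        · exact Or.inr ⟨by omega, h2⟩
  rw [decide_eq_decide.mpr h]
  by_cases h1 : a.2 < b.2 <;> by_cases h2 : b.2 < a.2 <;> by_cases h3 : a.1 < b.1 <;>
    simp [h1, h2, h3]
  infer_instance

-- pointwise-equal comparison functions give the same insertBy, hence the same sorted2 fold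
theorem insertBy_congr {α : Type} (f g : α → α → Bool) (h : ∀ a b, f a b = g a b)
    (x : α) (ys : List α) : PySem.List.insertBy f x ys = PySem.List.insertBy g x ys := by
  induction ys with
  | nil => rfl
  | cons y t ih => simp only [PySem.List.insertBy, h, ih]

theorem foldl_insertBy_congr {α : Type} (f g : α → α → Bool) (h : ∀ a b, f a b = g a b)
    (xs acc : List α) :
    xs.foldl (fun acc x => PySem.List.insertBy f x acc) acc
      = xs.foldl (fun acc x => PySem.List.insertBy g x acc) acc := by
  induction xs generalizing acc with
  | nil => rfl
  | cons x t _ => simp only [List.foldl_cons, insertBy_congr f g h]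

theorem foldl_insertBy_pairwise_ge {α κ : Type} [LinearOrder κ] (key : α → κ)
    (xs acc : List α) (h : acc.Pairwise (fun a b => key b ≤ key a)) :
    (xs.foldl (fun acc x =>
        PySem.List.insertBy (fun a b => decide (key b < key a)) x acc) acc).Pairwise
      (fun a b => key b ≤ key a) := by
  induction xs generalizing acc with
  | nil => exact h
  | cons x t ih =>
    exact ih _ (PySem.List.insertBy_pairwise_ge key x acc h)

-- a descending (w.r.t. key) rearrangement of xs is unique
theorem desc_unique {α κ : Type} [LinearOrder κ] (key : α → κ)
    (hinj : Function.Injective key) (l₁ l₂ : List α) (hp : l₁.Perm l₂)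
    (h₁ : l₁.Pairwise (fun a b => key b ≤ key a))
    (h₂ : l₂.Pairwise (fun a b => key b ≤ key a)) : l₁ = l₂ :=
  List.Perm.eq_of_pairwise
    (fun _ _ _ _ hab hba => hinj (le_antisymm hba hab)) h₁ h₂ hp

-- A's sorted order, named
def sortedD (cl : List (Int × String)) : List (Int × String) :=
  PySem.List.sorted2 cl (fun p => p.1) (fun p => p.2) true

theorem sortedD_eq_foldl (cl : List (Int × String)) :
    sortedD cl = cl.foldl (fun acc x =>
      PySem.List.insertBy (fun a b => decide (keyCV b < keyCV a)) x acc) [] := by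
  unfold sortedD PySem.List.sorted2
  exact foldl_insertBy_congr _ _ (fun a b => ltb_eq_decide_keyCV b a) cl []

theorem sortedD_perm (cl : List (Int × String)) : (sortedD cl).Perm cl :=
  PySem.List.sorted2_perm cl _ _ true

theorem sortedD_pairwise (cl : List (Int × String)) :
    (sortedD cl).Pairwise (fun a b => keyCV b ≤ keyCV a) := by
  rw [sortedD_eq_foldl]
  exact foldl_insertBy_pairwise_ge keyCV cl [] (List.Pairwise.nil)

-- B's sort on (value, count) items
theorem sortedB_eq_foldl (l : List (String × Int)) :
    PySem.List.sorted2 l (fun kv => kv.2) (fun kv => kv.1) true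
      = l.foldl (fun acc x =>
          PySem.List.insertBy (fun a b => decide (keyVC b < keyVC a)) x acc) [] := by
  unfold PySem.List.sorted2
  exact foldl_insertBy_congr _ _ (fun a b => ltb_eq_decide_keyVC b a) l []

theorem sortedB_pairwise (l : List (String × Int)) :
    (PySem.List.sorted2 l (fun kv => kv.2) (fun kv => kv.1) true).Pairwise
      (fun a b => keyVC b ≤ keyVC a) := by
  rw [sortedB_eq_foldl]
  exact foldl_insertBy_pairwise_ge keyVC l [] (List.Pairwise.nil)

-- B's sorted items are exactly A's sorted pairs with the components swapped
theorem sortedB_eq_swap_sortedD (cl : List (Int × String)) :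
    PySem.List.sorted2 (cl.map (fun p => (p.2, p.1)))
        (fun kv => kv.2) (fun kv => kv.1) true
      = (sortedD cl).map (fun p => (p.2, p.1)) := by
  apply desc_unique keyVC keyVC_injective
  · exact (PySem.List.sorted2_perm _ _ _ true).trans
      ((sortedD_perm cl).map (fun p => (p.2, p.1))).symm
  · exact sortedB_pairwise _
  · have := sortedD_pairwise cl
    exact (List.pairwise_map).mpr (by
      refine this.imp ?_
      intro a b h
      simpa [keyVC_swap] using h)

-- ---- the selection loop extracts the pairs in exactly the descending sorted order ----

-- the maximum-accumulating fold inside max2?, with its comparison read as a key comparison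
def stepCV (acc : Option (Int × String)) (x : Int × String) : Option (Int × String) :=
  match acc with
  | none => some x
  | some m => if keyCV m < keyCV x then some x else some m

theorem max2?_eq_foldl_stepCV (cl : List (Int × String)) :
    PySem.List.max2? cl (fun p => p.1) (fun p => p.2) = cl.foldl stepCV none := by
  unfold PySem.List.max2?
  congr 1
  funext acc x
  cases acc with
  | none => rfl
  | some m =>
    show (if _ = true then _ else _) = stepCV (some m) x
    rw [ltb_eq_decide_keyCV]
    unfold stepCV
    by_cases h : keyCV m < keyCV x <;> simp [h]

theorem max2_foldl_spec (l : List (Int × String)) :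
    ∀ m0 : Int × String,
      ∃ m, l.foldl stepCV (some m0) = some m
        ∧ (m = m0 ∨ m ∈ l) ∧ keyCV m0 ≤ keyCV m ∧ ∀ y ∈ l, keyCV y ≤ keyCV m := by
  induction l with
  | nil => intro m0; exact ⟨m0, rfl, Or.inl rfl, le_refl _, by simp⟩
  | cons x t ih =>
    intro m0
    simp only [List.foldl_cons]
    by_cases h : keyCV m0 < keyCV x
    · rw [show stepCV (some m0) x = some x by simp [stepCV, h]]
      obtain ⟨m, hm, hmem, hub0, hub⟩ := ih x
      refine ⟨m, hm, ?_, le_of_lt (lt_of_lt_of_le h hub0), ?_⟩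
      · rcases hmem with h' | h'
        · exact Or.inr (h' ▸ List.mem_cons_self)
        · exact Or.inr (List.mem_cons_of_mem _ h')
      · intro y hy
        rcases List.mem_cons.mp hy with rfl | hy'
        · exact hub0
        · exact hub y hy'
    · rw [show stepCV (some m0) x = some m0 by simp [stepCV, h]]
      obtain ⟨m, hm, hmem, hub0, hub⟩ := ih m0
      refine ⟨m, hm, ?_, hub0, ?_⟩
      · rcases hmem with h' | h'
        · exact Or.inl h'
        · exact Or.inr (List.mem_cons_of_mem _ h')
      · intro y hy
        rcases List.mem_cons.mp hy with rfl | hy'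
        · exact le_trans (le_of_not_gt h) hub0
        · exact hub y hy'

theorem max2_spec (cl : List (Int × String)) (hne : cl ≠ []) :
    ∃ m, PySem.List.max2? cl (fun p => p.1) (fun p => p.2) = some m
      ∧ m ∈ cl ∧ ∀ y ∈ cl, keyCV y ≤ keyCV m := by
  obtain ⟨c, t, rfl⟩ := List.exists_cons_of_ne_nil hne
  obtain ⟨m, hm, hmem, hub0, hub⟩ := max2_foldl_spec t c
  refine ⟨m, ?_, ?_, ?_⟩
  · rw [max2?_eq_foldl_stepCV]
    simpa [stepCV] using hm
  · rcases hmem with rfl | h'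
    · exact List.mem_cons_self
    · exact List.mem_cons_of_mem _ h'
  · intro y hy
    rcases List.mem_cons.mp hy with rfl | hy'
    · exact hub0
    · exact hub y hy'

theorem eraseIdx_append (pre suf : List (Int × String)) (v : Int × String) :
    (pre ++ v :: suf).eraseIdx pre.length = pre ++ suf := by
  induction pre with
  | nil => rfl
  | cons p t ih => simpa [List.eraseIdx] using ih

def renderA (cv : Int × String) : List Char := PySem.List.pyRepeat cv.2.toList cv.1

theorem selLoopA_eq_aux : ∀ (n : Nat) (cl : List (Int × String)), cl.length = n →
    ∀ acc, selLoopA cl acc = acc ++ ((sortedD cl).map renderA).flatten := by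
  intro n
  induction n using Nat.strong_induction_on with
  | _ n ih =>
    intro cl hlen acc
    rcases cl with _ | ⟨c, t⟩
    · rw [selLoopA]
      simp [sortedD, PySem.List.sorted2]
    · obtain ⟨m, hm, hmem, hub⟩ := max2_spec (c :: t) (by simp)
      have hidx : (PySem.List.index? (c :: t) m).isSome := by
        rw [PySem.List.index?_isSome_iff]; exact hmem
      obtain ⟨idx, hidxeq⟩ := Option.isSome_iff_exists.mp hidx
      obtain ⟨pre, suf, hsplit, hprelen, _⟩ :=
        (PySem.List.index?_eq_some_iff _ _ _).mp hidxeq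
      have hidxlt : idx < (c :: t).length := by
        rw [hsplit, ← hprelen]; simp
      have hpop : PySem.List.pop? (c :: t) (idx : Int)
          = some ((c :: t)[idx], (c :: t).eraseIdx idx) :=
        PySem.List.pop?_natCast _ idx hidxlt
      have herase : (c :: t).eraseIdx idx = pre ++ suf := by
        rw [hsplit, ← hprelen]; exact eraseIdx_append pre suf m
      rw [selLoopA]
      simp only [if_pos (by simp : 0 < (c :: t).length), hm, hidxeq]
      split
      · next heq => rw [hpop] at heq; cases heq
      · next vr heq =>
        rw [hpop] at heq
        cases heq
        have hlt : (pre ++ suf).length < n := by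
          have : (c :: t).length = (pre ++ suf).length + 1 := by
            rw [hsplit]; simp; omega
          omega
        show selLoopA ((c :: t).eraseIdx idx) _ = _
        rw [herase, ih _ hlt (pre ++ suf) rfl]
        -- identify m :: sortedD (pre ++ suf) with sortedD (c :: t)
        have hkey : (m :: sortedD (pre ++ suf)) = sortedD (c :: t) := by
          apply desc_unique keyCV keyCV_injective
          · refine (List.Perm.cons m (sortedD_perm _)).trans ?_
            rw [hsplit]
            exact List.perm_middle.symm.trans (sortedD_perm _).symm
          · refine List.pairwise_cons.mpr ⟨?_, sortedD_pairwise _⟩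
            intro b hb
            have hb' : b ∈ pre ++ suf := (sortedD_perm _).mem_iff.mp hb
            have hb'' : b ∈ (c :: t) := by
              rw [hsplit]
              rcases List.mem_append.mp hb' with h' | h'
              · exact List.mem_append.mpr (Or.inl h')
              · exact List.mem_append.mpr (Or.inr (List.mem_cons_of_mem _ h'))
            exact hub b hb''
          · exact sortedD_pairwise _
        rw [← hkey]
        simp [renderA]

theorem selLoopA_eq (cl : List (Int × String)) (acc : List Char) :
    selLoopA cl acc = acc ++ ((sortedD cl).map renderA).flatten :=
  selLoopA_eq_aux cl.length cl rfl acc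

-- join with the empty separator is flatten
theorem join_nil_sep (ls : List (List Char)) : PySem.Chars.join [] ls = ls.flatten := by
  induction ls with
  | nil => rfl
  | cons x t ih =>
    rcases t with _ | ⟨y, t'⟩
    · simp [PySem.Chars.join_singleton]
    · rw [PySem.Chars.join_cons_cons]
      simp [ih]

-- ===== VERDICT (by name: the statement is the Claim_ definition above) =====
theorem card_hand_sum_spec : Claim_equal_card_hand_sum := by
  intro hand _ _
  show card_hand_sum hand = card_hand_sum_alt hand
  have hnums : numsB hand = numsA hand := rfl
  simp only [card_hand_sum, card_hand_sum_alt, hnums]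
  set nums := numsA hand with hn
  -- A's count list
  rw [PySem.List.foldl_append_singleton_eq_map
    (fun i => (((nums.count i : Nat) : Int), i)) (PySem.Set.ofList nums) []]
  set cl : List (Int × String) :=
    (PySem.Set.ofList nums).map (fun i => (((nums.count i : Nat) : Int), i)) with hcl
  rw [List.nil_append, selLoopA_eq cl []]
  -- B's grouped items
  rw [PySem.Dict.foldl_insert_getD_add_one_eq_counter nums, PySem.Dict.items_counter nums]
  have hitems : (PySem.Set.ofList nums).map (fun k => (k, ((nums.count k : Nat) : Int)))
      = cl.map (fun p => (p.2, p.1)) := by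
    rw [hcl, List.map_map]; rfl
  rw [hitems, sortedB_eq_swap_sortedD cl, List.map_map, join_nil_sep]
  have hrender : ((fun kv : String × Int => PySem.List.pyRepeat kv.1.toList kv.2) ∘
      (fun p : Int × String => (p.2, p.1))) = renderA := rfl
  rw [hrender]
  simp
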